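-- pv_equiv track=rewrite | github.com/stsouko/CGRdb | utils/reaxys.py | __add_query
-- ===== SOURCE A (Python) =====
-- def __add_query(dictionary, kw):
--     xx = []
--     for k, v in kw.items():
--         if k in dictionary:
--             if dictionary[k] is None:
--                 if v:
--                     xx.append(k)
--             else:
--                 a, b = dictionary[k]
--                 if a <= v <= b:
--                     xx.append(f'{k}={v}')
--                 else:
--                     raise Exception(f'invalid value for {k}')
--     return xx
-- ===== SOURCE B (Python) =====
-- def __add_query(dictionary, kw):
--     # pass 1: validate every ranged key (same first-violation exception, same order)
--     for k, v in kw.items():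
--         rng = dictionary.get(k)
--         if rng is not None:
--             a, b = rng
--             if not (a <= v <= b):
--                 raise Exception(f'invalid value for {k}')
--     # pass 2: construction, validation already done
--     return [k if dictionary[k] is None else f'{k}={v}'
--             for k, v in kw.items()
--             if k in dictionary and (dictionary[k] is not None or v)]
-- ===== Notes on version B (the rewrite author's own statement) =====
-- stated objective: alternative
-- what changed: B splits A's fused loop into two differently-shaped passes: a validation loop that raises the identical exception on the first out-of-range key, then a single list comprehension that builds the result with no raise path.
import Mathlib
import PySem

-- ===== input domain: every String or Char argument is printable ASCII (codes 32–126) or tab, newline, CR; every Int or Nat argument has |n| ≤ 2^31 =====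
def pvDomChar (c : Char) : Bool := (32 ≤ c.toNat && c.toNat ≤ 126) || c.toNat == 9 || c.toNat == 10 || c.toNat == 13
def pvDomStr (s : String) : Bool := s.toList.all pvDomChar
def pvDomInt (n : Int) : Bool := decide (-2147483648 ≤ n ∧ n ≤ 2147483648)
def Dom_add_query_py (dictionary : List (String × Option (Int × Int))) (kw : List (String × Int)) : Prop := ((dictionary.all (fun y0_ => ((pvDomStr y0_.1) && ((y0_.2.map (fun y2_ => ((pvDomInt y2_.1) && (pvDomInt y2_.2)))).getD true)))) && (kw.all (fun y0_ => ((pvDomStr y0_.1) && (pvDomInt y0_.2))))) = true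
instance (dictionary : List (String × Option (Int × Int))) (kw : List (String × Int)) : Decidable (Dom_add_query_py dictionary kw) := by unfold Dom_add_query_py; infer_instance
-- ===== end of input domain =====

-- B separates A's fused loop into a validation pass (raising A's exact exception on the
-- first out-of-range key) and a construction pass written as one comprehension (objective: alternative).

-- shared lookup helper: Python dict lookup (keys unique under Pre_, so first match = the match)
def pvLook (dictionary : List (String × Option (Int × Int))) (k : String) : Option (Option (Int × Int)) :=
  (dictionary.find? (fun p => p.1 == k)).map Prod.snd

-- ===== PORT A =====
-- A's single loop with accumulator xx; on the raise branch Python raises (excluded by Pre_),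
-- the port returns the accumulator there (unreachable under Pre_).
def addQueryGoA (dictionary : List (String × Option (Int × Int))) :
    List (String × Int) → List String → List String
  | [], xx => xx
  | (k, v) :: rest, xx =>
    match pvLook dictionary k with
    | none => addQueryGoA dictionary rest xx
    | some none =>
        if v ≠ 0 then addQueryGoA dictionary rest (xx ++ [k])
        else addQueryGoA dictionary rest xx
    | some (some (a, b)) =>
        if a ≤ v ∧ v ≤ b then
          addQueryGoA dictionary rest (xx ++ [k ++ "=" ++ PySem.Int.toStr v])
        else xx

def add_query_py (dictionary : List (String × Option (Int × Int))) (kw : List (String × Int)) : List String :=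
  addQueryGoA dictionary kw []

-- ===== PORT B =====
-- pass 1 of Source B: validate ranged keys; false = Python raises (unreachable under Pre_)
def addQueryValidB (dictionary : List (String × Option (Int × Int))) : List (String × Int) → Bool
  | [] => true
  | (k, v) :: rest =>
    match pvLook dictionary k with
    | some (some (a, b)) => if a ≤ v ∧ v ≤ b then addQueryValidB dictionary rest else false
    | _ => addQueryValidB dictionary rest

-- pass 2 of Source B: the comprehension
def addQueryBuildB (dictionary : List (String × Option (Int × Int))) (kw : List (String × Int)) : List String :=
  kw.filterMap (fun p =>
    match p, pvLook dictionary p.1 with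
    | _, none => none
    | (k, v), some none => if v ≠ 0 then some k else none
    | (k, v), some (some _) => some (k ++ "=" ++ PySem.Int.toStr v))

def add_query_py_alt (dictionary : List (String × Option (Int × Int))) (kw : List (String × Int)) : List String :=
  if addQueryValidB dictionary kw then addQueryBuildB dictionary kw else []

-- ===== PRECONDITION & SPEC =====
-- true iff the value of a ranged key is inside its range (A's no-raise condition per item)
def pvRangeOk (dictionary : List (String × Option (Int × Int))) (p : String × Int) : Bool :=
  match pvLook dictionary p.1 with
  | some (some (a, b)) => decide (a ≤ p.2 ∧ p.2 ≤ b)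
  | _ => true

-- Both arguments are Python dicts, whose keys are necessarily unique: the two Nodup clauses
-- only state that dict shape (they exclude nothing a Python call could pass). The all-clause
-- excludes exactly the inputs on which A raises its Exception.
def Pre_add_query_py (dictionary : List (String × Option (Int × Int))) (kw : List (String × Int)) : Prop :=
  (dictionary.map Prod.fst).Nodup ∧ (kw.map Prod.fst).Nodup ∧ kw.all (pvRangeOk dictionary) = true
instance (dictionary : List (String × Option (Int × Int))) (kw : List (String × Int)) : Decidable (Pre_add_query_py dictionary kw) := by unfold Pre_add_query_py; infer_instance

def pvWitness_add_query_py : (List (String × Option (Int × Int))) × (List (String × Int)) :=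
  ([("a", none), ("b", some (0, 5))], [("a", 1), ("b", 3), ("c", 7)])

def Spec_add_query_py (dictionary : List (String × Option (Int × Int))) (kw : List (String × Int)) (out : List String) : Prop := out = add_query_py_alt dictionary kw
instance (dictionary : List (String × Option (Int × Int))) (kw : List (String × Int)) (out : List String) : Decidable (Spec_add_query_py dictionary kw out) := by unfold Spec_add_query_py; infer_instance

-- ===== CLAIM (what is proved, stated in full; the proofs are below) =====
def Claim_equal_add_query_py : Prop := ∀ (dictionary : List (String × Option (Int × Int))) (kw : List (String × Int)), Dom_add_query_py dictionary kw → Pre_add_query_py dictionary kw → Spec_add_query_py dictionary kw (add_query_py dictionary kw)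

-- ===== LEMMAS AND PROOFS =====
theorem addQueryValidB_of_all (dictionary : List (String × Option (Int × Int))) :
    ∀ kw : List (String × Int), kw.all (pvRangeOk dictionary) = true →
      addQueryValidB dictionary kw = true := by
  intro kw
  induction kw with
  | nil => intro _; rfl
  | cons p rest ih =>
    intro h
    simp only [List.all_cons, Bool.and_eq_true] at h
    obtain ⟨hp, hrest⟩ := h
    obtain ⟨k, v⟩ := p
    simp only [addQueryValidB]
    unfold pvRangeOk at hp
    cases hL : pvLook dictionary k with
    | none => simp [hL]; exact ih hrest
    | some o =>
      cases o with
      | none => simp [hL]; exact ih hrest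
      | some r =>
        obtain ⟨a, b⟩ := r
        rw [hL] at hp
        simp only [decide_eq_true_eq] at hp
        simp [hL, hp]
        exact ih hrest

theorem addQueryGoA_eq_build (dictionary : List (String × Option (Int × Int))) :
    ∀ (kw : List (String × Int)) (xx : List String),
      kw.all (pvRangeOk dictionary) = true →
      addQueryGoA dictionary kw xx = xx ++ addQueryBuildB dictionary kw := by
  intro kw
  induction kw with
  | nil => intro xx _; simp [addQueryGoA, addQueryBuildB]
  | cons p rest ih =>
    intro xx h
    simp only [List.all_cons, Bool.and_eq_true] at h
    obtain ⟨hp, hrest⟩ := h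
    obtain ⟨k, v⟩ := p
    unfold pvRangeOk at hp
    cases hL : pvLook dictionary k with
    | none =>
      simp only [addQueryGoA, addQueryBuildB, List.filterMap_cons, hL]
      rw [ih xx hrest]; rfl
    | some o =>
      cases o with
      | none =>
        simp only [addQueryGoA, addQueryBuildB, List.filterMap_cons, hL]
        by_cases hv : v = 0
        · simp only [hv, ne_eq, not_true_eq_false, if_neg, reduceIte]
          rw [ih xx hrest]; rfl
        · simp only [hv, ne_eq, not_false_eq_true, if_pos]
          rw [ih (xx ++ [k]) hrest]
          simp [addQueryBuildB]
      | some r =>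
        obtain ⟨a, b⟩ := r
        rw [hL] at hp
        simp only [decide_eq_true_eq] at hp
        simp only [addQueryGoA, addQueryBuildB, List.filterMap_cons, hL, hp]
        rw [ih (xx ++ [k ++ "=" ++ PySem.Int.toStr v]) hrest]
        simp [addQueryBuildB]

-- ===== VERDICT (by name: the statement is the Claim_ definition above) =====
theorem add_query_py_spec : Claim_equal_add_query_py := by
  intro dictionary kw _ hpre
  obtain ⟨_, _, hall⟩ := hpre
  unfold Spec_add_query_py add_query_py add_query_py_alt
  rw [addQueryValidB_of_all dictionary kw hall, if_pos rfl]
  rw [addQueryGoA_eq_build dictionary kw [] hall]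
  rfl
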